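-- pv_equiv track=rewrite | github.com/weikaih04/question_generation | balance/mp_balancing_struct.py | deleteXFromDistr
-- ===== SOURCE A (Python) =====
-- import math
--
-- def deleteXFromDistr(dist, x):
--     to_del = {}
--     for a in dist:
--         to_del[a] = 0
--
--     while x > 0:
--         per_cat = {}
--         for a in dist:
--             remain = len(dist[a]) - to_del[a]
--             if remain not in per_cat:
--                 per_cat[remain] = []
--
--             per_cat[remain].append(a)
--
--         per_cat_sorted = sorted(per_cat, reverse=True)
--
--         max_ans = per_cat[per_cat_sorted[0]]
--         num_per_max = math.ceil(x / len(max_ans))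
--
--         if len(per_cat_sorted) > 1:
--             diff = per_cat_sorted[0] - per_cat_sorted[1]
--         else:
--             diff = per_cat_sorted[0]
--
--         if num_per_max > diff:
--             # here, would be too far.
--             # only delete pcs[0] - pcs[1] from all max,
--             # and reduce num_del by the right amount
--             num_per_max = diff
--         for a in max_ans:
--             to_del[a] += num_per_max
--             x -= num_per_max
--
--     return to_del
-- ===== SOURCE B (Python) =====
-- def deleteXFromDistr(dist, x):
--     # Level-walk re-implementation: sort the distinct category sizes once and
--     # walk them top-down with a running count of max-size categories, then
--     # emit the whole answer with one closed-form comprehension.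
--     if x <= 0:
--         return {a: 0 for a in dist}
--     heights = [len(v) for v in dist.values()]
--     cnt = {}
--     for h in heights:
--         cnt[h] = cnt.get(h, 0) + 1
--     levels = sorted(cnt, reverse=True)
--     k = 0
--     rem = x
--     for j, L in enumerate(levels):
--         k += cnt[L]
--         nxt = levels[j + 1] if j + 1 < len(levels) else 0
--         avail = k * (L - nxt)
--         if rem <= avail:
--             per = -(-rem // k)
--             lvl = L - per
--             return {a: max(len(v) - lvl, 0) for a, v in dist.items()}
--         rem -= avail
--     # x exceeds the total number of items: delete everything (A never returns here)
--     return {a: len(v) for a, v in dist.items()}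
-- ===== Notes on version B (the rewrite author's own statement) =====
-- stated objective: alternative
-- what changed: A re-groups all categories by remaining size, sorts the groups and levels only the top group once per while-iteration; B counts the sizes once, sorts the distinct sizes once and walks them top-down with a running count of max-size categories, emitting the whole answer in one closed-form pass (no measured speed difference is claimed).
-- outside the precondition, e.g. on deleteXFromDistr({'a': [1]}, 5): A does not finish within the time limit, B returns {'a': 1}; on deleteXFromDistr({}, 1): A raises IndexError, B returns {}
import Mathlib
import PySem

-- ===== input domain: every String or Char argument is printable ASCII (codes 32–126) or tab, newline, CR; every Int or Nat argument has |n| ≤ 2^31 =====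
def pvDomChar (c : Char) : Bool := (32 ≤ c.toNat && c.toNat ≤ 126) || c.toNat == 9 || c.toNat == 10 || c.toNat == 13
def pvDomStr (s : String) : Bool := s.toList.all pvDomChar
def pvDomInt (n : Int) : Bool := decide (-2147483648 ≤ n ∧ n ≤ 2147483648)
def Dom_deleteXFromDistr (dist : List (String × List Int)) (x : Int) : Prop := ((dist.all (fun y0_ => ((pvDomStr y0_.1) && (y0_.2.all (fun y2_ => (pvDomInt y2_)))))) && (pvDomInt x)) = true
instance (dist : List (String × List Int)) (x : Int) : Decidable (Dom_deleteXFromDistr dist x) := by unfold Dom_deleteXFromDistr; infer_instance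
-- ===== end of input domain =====

-- B levels the largest categories down by walking the sorted distinct category sizes once
-- instead of re-grouping and re-sorting the whole distribution on every while-iteration
-- (objective: alternative algorithm; no speed difference is claimed).

-- ===== PORT A =====
-- math.ceil(a / b) for b > 0; exact for the |n| ≤ 2^31 ints of the domain
def pvCeil (a b : Int) : Int := -(PySem.Int.floordiv (-a) b)

-- the 'while x > 0' loop of A; fuel only makes the recursion structural
-- (under Pre_ the loop runs at most dist.length + 1 times, see pv_fuel reasoning in the proofs)
def pvAIter (dist : List (String × List Int)) (fuel : Nat)
    (toDel : PySem.Dict String Int) (x : Int) : PySem.Dict String Int :=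
  match fuel with
  | 0 => toDel
  | fuel + 1 =>
    if x ≤ 0 then toDel
    else
      let perCat : PySem.Dict Int (List String) :=
        dist.foldl (fun d p =>
          d.modify ((p.2.length : Int) - toDel.getD p.1 0) [] (fun l => l ++ [p.1]))
          PySem.Dict.empty
      let pcs := PySem.List.sorted perCat.keys (fun v => v) true
      match pcs with
      | [] => toDel  -- Python raises IndexError on pcs[0] here (only for dist = {} with x > 0; outside Pre_)
      | top :: rest =>
        let maxAns := perCat.getD top []
        let num0 := pvCeil x (maxAns.length : Int)
        let diff := if (top :: rest).length > 1 then top - PySem.List.pyGetD (top :: rest) 1 0 else top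
        let num := if num0 > diff then diff else num0
        let st := maxAns.foldl (fun s a => (s.1.modify a 0 (· + num), s.2 - num)) (toDel, x)
        pvAIter dist fuel st.1 st.2

def deleteXFromDistr (dist : List (String × List Int)) (x : Int) : List (String × Int) :=
  let toDel := dist.foldl (fun d p => d.insert p.1 0) PySem.Dict.empty
  (pvAIter dist (dist.length + 1) toDel x).items

-- ===== PORT B =====
-- walk the distinct sizes top-down; k = number of categories at or above the current level
def pvBWalk (dist : List (String × List Int)) (cnt : PySem.Dict Int Int)
    (levels : List Int) (k rem : Int) : List (String × Int) :=
  match levels with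
  | [] => dist.map (fun p => (p.1, (p.2.length : Int)))
  | L :: rest =>
    let k := k + cnt.getD L 0
    let nxt := match rest with | [] => 0 | n :: _ => n
    let avail := k * (L - nxt)
    if rem ≤ avail then
      let per := -(PySem.Int.floordiv (-rem) k)
      let lvl := L - per
      dist.map (fun p => (p.1, max ((p.2.length : Int) - lvl) 0))
    else pvBWalk dist cnt rest k (rem - avail)

def deleteXFromDistr_alt (dist : List (String × List Int)) (x : Int) : List (String × Int) :=
  if x ≤ 0 then dist.map (fun p => (p.1, (0 : Int)))
  else
    let heights := dist.map (fun p => (p.2.length : Int))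
    let cnt := heights.foldl (fun d h => d.insert h (d.getD h 0 + 1)) PySem.Dict.empty
    let levels := PySem.List.sorted cnt.keys (fun v => v) true
    pvBWalk dist cnt levels 0 x

-- ===== PRECONDITION & SPEC =====
-- Pre_ excludes (a) association lists with duplicate keys, unrepresentable as the Python dict A receives,
-- and (b) x larger than the total number of items, where A loops forever (or raises IndexError on an empty dict).
def Pre_deleteXFromDistr (dist : List (String × List Int)) (x : Int) : Prop :=
  (dist.map Prod.fst).Nodup ∧ x ≤ (dist.map (fun p => (p.2.length : Int))).sum
instance (dist : List (String × List Int)) (x : Int) : Decidable (Pre_deleteXFromDistr dist x) := by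
  unfold Pre_deleteXFromDistr; infer_instance

def pvWitness_deleteXFromDistr : (List (String × List Int)) × Int := ([("a", [0]), ("b", [0, 1])], 2)

def Spec_deleteXFromDistr (dist : List (String × List Int)) (x : Int) (out : List (String × Int)) : Prop := out = deleteXFromDistr_alt dist x
instance (dist : List (String × List Int)) (x : Int) (out : List (String × Int)) : Decidable (Spec_deleteXFromDistr dist x out) := by unfold Spec_deleteXFromDistr; infer_instance

-- ===== CLAIM (what is proved, stated in full; the proofs are below) =====
def Claim_equal_deleteXFromDistr : Prop := ∀ (dist : List (String × List Int)) (x : Int), Dom_deleteXFromDistr dist x → Pre_deleteXFromDistr dist x → Spec_deleteXFromDistr dist x (deleteXFromDistr dist x)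


-- ===== LEMMAS AND PROOFS =====

-- the list of category sizes, in dist order
def pvHts (dist : List (String × List Int)) : List Int := dist.map (fun p => (p.2.length : Int))

-- number of categories of size > L (resp. ≥ L)
def pvKgt (dist : List (String × List Int)) (L : Int) : Nat :=
  ((pvHts dist).filter (fun v => decide (L < v))).length
def pvKge (dist : List (String × List Int)) (L : Int) : Nat :=
  ((pvHts dist).filter (fun v => decide (L ≤ v))).length

lemma pvKge_split (dist : List (String × List Int)) (L : Int) :
    pvKge dist L = pvKgt dist L + (pvHts dist).count L := by
  unfold pvKge pvKgt
  induction pvHts dist with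
  | nil => simp
  | cons h t ih =>
    simp only [List.filter_cons, List.count_cons, decide_eq_true_eq]
    by_cases h1 : L < h
    · have h2 : L ≤ h := le_of_lt h1
      have h3 : ¬ h = L := by omega
      simp [h1, h2, h3, ih]
      omega
    · by_cases h2 : h = L
      · subst h2
        simp [ih]
        omega
      · have h3 : ¬ L ≤ h := by omega
        simp [h1, h2, h3, ih]

-- split a pair-state fold: the Int component just counts
lemma pvFoldPair (s : List String) (g : PySem.Dict String Int → String → PySem.Dict String Int)
    (d : PySem.Dict String Int) (x num : Int) :
    s.foldl (fun st a => (g st.1 a, st.2 - num)) (d, x) = (s.foldl g d, x - num * s.length) := by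
  induction s generalizing d x with
  | nil => simp
  | cons a t ih =>
    simp only [List.foldl_cons, ih, List.length_cons, Prod.mk.injEq]
    exact ⟨trivial, by push_cast; ring⟩

lemma pvGetD_foldl_modify_add (s : List String) (num : Int) :
    ∀ (d : PySem.Dict String Int) (c : String), s.Nodup →
    (s.foldl (fun d a => d.modify a 0 (· + num)) d).getD c 0
      = d.getD c 0 + (if c ∈ s then num else 0) := by
  induction s with
  | nil => simp
  | cons a t ih =>
    intro d c hnd
    simp only [List.foldl_cons]
    rw [ih _ _ hnd.of_cons]
    rw [PySem.Dict.getD_modify]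
    by_cases hc : c = a
    · subst hc
      have : c ∉ t := (List.nodup_cons.mp hnd).1
      simp [this]
    · simp [hc, List.mem_cons]

-- ceil arithmetic
lemma pvCeil_le_iff (a b d : Int) (hb : 0 < b) : pvCeil a b ≤ d ↔ a ≤ d * b := by
  unfold pvCeil
  rw [neg_le, PySem.Int.le_floordiv_iff_mul_le hb]
  constructor <;> intro h <;> nlinarith

lemma pvCeil_mul_ge (a b : Int) (hb : 0 < b) : a ≤ pvCeil a b * b :=
  (pvCeil_le_iff a b (pvCeil a b) hb).mp le_rfl

lemma pvCeil_pos (a b : Int) (hb : 0 < b) (ha : 0 < a) : 0 < pvCeil a b := by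
  by_contra h
  rw [not_lt] at h
  have h2 : a ≤ pvCeil a b * b := pvCeil_mul_ge a b hb
  nlinarith

-- sums of min-levels
lemma pvSum_min_drop (l : List Int) (L L' : Int) (hle : L' ≤ L)
    (hlow : ∀ v ∈ l, v < L → v ≤ L') :
    (l.map (fun h => min h L)).sum
      = (l.map (fun h => min h L')).sum + ((l.filter (fun v => decide (L ≤ v))).length : Int) * (L - L') := by
  induction l with
  | nil => simp
  | cons h t ih =>
    have iht := ih (fun v hv => hlow v (List.mem_cons_of_mem _ hv))
    simp only [List.map_cons, List.sum_cons, List.filter_cons, decide_eq_true_eq]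
    by_cases hL : L ≤ h
    · have h1 : min h L = L := by omega
      have h2 : min h L' = L' := by omega
      simp only [hL, if_pos, List.length_cons, h1, h2, iht]
      push_cast
      ring
    · have hlo : h ≤ L' := hlow h List.mem_cons_self (by omega)
      have h1 : min h L = h := by omega
      have h2 : min h L' = h := by omega
      simp only [hL, if_neg, h1, h2, iht, not_false_iff]
      ring

-- membership of p.1 in the fst-projection of a filtered nodup list
lemma pvMem_map_fst_filter (dist : List (String × List Int)) (q : String × List Int → Bool)
    (hnd : (dist.map Prod.fst).Nodup) (p : String × List Int) (hp : p ∈ dist) :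
    (p.1 ∈ (dist.filter q).map Prod.fst) ↔ q p = true := by
  induction dist with
  | nil => simp at hp
  | cons r t ih =>
    simp only [List.map_cons, List.nodup_cons] at hnd
    rcases List.mem_cons.mp hp with h | h
    · subst h
      have hnot : p.1 ∉ (t.filter q).map Prod.fst := fun hm => by
        rcases List.mem_map.mp hm with ⟨r', hr', he⟩
        exact hnd.1 (he ▸ List.mem_map_of_mem (List.mem_of_mem_filter hr'))
      simp only [List.filter_cons]
      by_cases hq : q p = true
      · simp [hq]
      · simp [hq, hnot]
    · have hne : r.1 ≠ p.1 := fun he => hnd.1 (he ▸ List.mem_map_of_mem h)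
      have := ih hnd.2 h
      simp only [List.filter_cons]
      by_cases hq : q r = true
      · simp only [hq, if_pos, List.map_cons, List.mem_cons]
        rw [this]
        constructor
        · rintro (he | hm)
          · exact absurd he.symm hne
          · exact hm
        · exact Or.inr
      · simp only [hq]; simpa using this

-- a lookup in a dict whose items list is a map over dist
lemma pvGetD_items_map (dist : List (String × List Int)) (f : String × List Int → Int)
    (d : PySem.Dict String Int)
    (hitems : d.items = dist.map (fun q => (q.1, f q)))
    (hnd : (dist.map Prod.fst).Nodup)
    (p : String × List Int) (hp : p ∈ dist) : d.getD p.1 0 = f p := by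
  have hk : d.keys.Nodup := by
    simp only [PySem.Dict.keys, hitems, List.map_map]
    exact hnd
  have hmem : (p.1, f p) ∈ d.items := by
    rw [hitems]; exact List.mem_map_of_mem hp
  exact PySem.Dict.getD_of_mem_items d hmem hk 0

lemma pvKeys_of_items_map (dist : List (String × List Int)) (f : String × List Int → Int)
    (d : PySem.Dict String Int)
    (hitems : d.items = dist.map (fun q => (q.1, f q))) :
    d.keys = dist.map Prod.fst := by
  simp only [PySem.Dict.keys, hitems, List.map_map]
  rfl

-- PySem.Set.update with only already-present elements is the identity
lemma pvSet_update_of_subset {α : Type} [BEq α] [LawfulBEq α] (l : List α) :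
    ∀ s : PySem.Set α, (∀ v ∈ l, v ∈ s) → PySem.Set.update s l = s := by
  induction l with
  | nil => intro s _; rfl
  | cons a t ih =>
    intro s hs
    have ha : a ∈ s := hs a List.mem_cons_self
    have hadd : PySem.Set.add s a = s := by simp [PySem.Set.add, ha]
    have : PySem.Set.update s (a :: t) = PySem.Set.update (PySem.Set.add s a) t := rfl
    rw [this, hadd]
    exact ih s (fun v hv => hs v (List.mem_cons_of_mem _ hv))

-- the current diff / num of one iteration of A, at top level L with remaining levels rest
def pvDiffOf (L : Int) (rest : List Int) : Int := match rest with | [] => L | L2 :: _ => L - L2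
def pvNumOf (dist : List (String × List Int)) (L : Int) (rest : List Int) (rem : Int) : Int :=
  if pvCeil rem (pvKge dist L) > pvDiffOf L rest then pvDiffOf L rest else pvCeil rem (pvKge dist L)

-- one iteration of A's while-loop, under the leveling invariant
lemma pvIterStep (dist : List (String × List Int)) (hnd : (dist.map Prod.fst).Nodup)
    (L : Int) (rest : List Int) (toDel : PySem.Dict String Int) (rem : Int) (fuel : Nat)
    (hpw : (L :: rest).Pairwise (· > ·))
    (hmem : ∀ v, v ∈ L :: rest ↔ (v = L ∨ (v ∈ pvHts dist ∧ v < L)))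
    (hex : ∃ h ∈ pvHts dist, L ≤ h)
    (hinv : toDel.items = dist.map (fun p => (p.1, max ((p.2.length : Int) - L) 0)))
    (hpos : 0 < rem) :
    ∃ toDel' : PySem.Dict String Int,
      toDel'.items = dist.map (fun p =>
        (p.1, max ((p.2.length : Int) - L) 0
              + (if L ≤ (p.2.length : Int) then pvNumOf dist L rest rem else 0)))
      ∧ pvAIter dist (fuel + 1) toDel rem
          = pvAIter dist fuel toDel'
              (rem - pvNumOf dist L rest rem * (pvKge dist L : Int)) := by
  have hkeysTD : toDel.keys = dist.map Prod.fst := pvKeys_of_items_map dist _ toDel hinv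
  -- the grouping key of each category in this iteration
  set hf : String × List Int → Int := fun p => min ((p.2.length : Int)) L with hhf
  -- (1) the per_cat fold, with the to_del lookups evaluated
  have hfold :
      dist.foldl (fun d p =>
          d.modify ((p.2.length : Int) - toDel.getD p.1 0) [] (fun l => l ++ [p.1]))
        PySem.Dict.empty
      = dist.foldl (fun d p => d.modify (hf p) [] (fun l => l ++ [p.1])) PySem.Dict.empty := by
    apply PySem.List.foldl_congr_mem
    intro acc p hp
    have := pvGetD_items_map dist _ toDel hinv hnd p hp
    rw [this]
    have : (p.2.length : Int) - max ((p.2.length : Int) - L) 0 = hf p := by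
      simp only [hhf]; omega
    rw [this]
  -- (2) its keys are the distinct grouping keys
  have hkeys :
      (dist.foldl (fun d p => d.modify (hf p) [] (fun l => l ++ [p.1])) PySem.Dict.empty).keys
        = PySem.Set.ofList (dist.map hf) := by
    rw [PySem.Dict.keys_foldl_modify_key dist hf [] (fun _ x l => l ++ [x.1])]
    rfl
  -- (3) sorting the keys descending gives exactly L :: rest
  have hndLR : (L :: rest).Nodup := (hpw.imp (fun h => ne_of_gt h))
  have hsorted :
      PySem.List.sorted (PySem.Set.ofList (dist.map hf)) (fun v => v) true = L :: rest := by
    apply PySem.List.sorted_rev_eq_of_perm_of_pairwise_gt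
    · rw [List.perm_ext_iff_of_nodup hndLR (PySem.Set.nodup_ofList _)]
      intro v
      rw [PySem.Set.mem_ofList]
      constructor
      · intro hv
        rcases (hmem v).mp hv with rfl | ⟨hv1, hv2⟩
        · rcases hex with ⟨h, hh, hLh⟩
          rcases List.mem_map.mp hh with ⟨p, hp, rfl⟩
          refine List.mem_map.mpr ⟨p, hp, ?_⟩
          simp only [hhf]; omega
        · rcases List.mem_map.mp hv1 with ⟨p, hp, rfl⟩
          refine List.mem_map.mpr ⟨p, hp, ?_⟩
          simp only [hhf]; omega
      · intro hv
        rcases List.mem_map.mp hv with ⟨p, hp, rfl⟩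
        apply (hmem _).mpr
        by_cases hc : L ≤ (p.2.length : Int)
        · left; simp only [hhf]; omega
        · right
          constructor
          · have : hf p = (p.2.length : Int) := by simp only [hhf]; omega
            rw [this]
            exact List.mem_map_of_mem hp
          · simp only [hhf]; omega
    · exact hpw
  -- (4) the members of the top group, in dist order
  have hmax :
      (dist.foldl (fun d p => d.modify (hf p) [] (fun l => l ++ [p.1])) PySem.Dict.empty).getD L []
        = (dist.filter (fun p => hf p == L)).map Prod.fst := by
    have h1 : dist.foldl (fun d p => d.modify (hf p) [] (fun l => l ++ [p.1])) PySem.Dict.empty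
        = (dist.map (fun p => (hf p, p.1))).foldl
            (fun d q => d.modify q.1 [] (fun l => l ++ [q.2])) PySem.Dict.empty := by
      rw [List.foldl_map]
    rw [h1, PySem.Dict.getD_foldl_modify_append]
    simp only [PySem.Dict.getD_empty, List.nil_append, List.filter_map, List.map_map]
    rfl
  set MA := (dist.filter (fun p => hf p == L)).map Prod.fst with hMA
  have hlenMA : MA.length = pvKge dist L := by
    simp only [hMA, List.length_map, pvKge, pvHts, List.filter_map, List.length_map]
    congr 1
    apply List.filter_congr
    intro p _
    simp only [hhf, Function.comp]
    by_cases hc : L ≤ (p.2.length : Int)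
    · simp [hc]
    · have : min ((p.2.length : Int)) L ≠ L := by omega
      simp [this, hc]
  have hKpos : 0 < pvKge dist L := by
    rcases hex with ⟨h, hh, hLh⟩
    apply List.length_pos_of_mem (a := h)
    exact List.mem_filter.mpr ⟨hh, by simpa using hLh⟩
  have hKposI : (0 : Int) < (pvKge dist L : Int) := by exact_mod_cast hKpos
  have hMAsub : ∀ v ∈ MA, v ∈ dist.map Prod.fst := by
    intro v hv
    rcases List.mem_map.mp hv with ⟨p, hp, rfl⟩
    exact List.mem_map_of_mem (List.mem_of_mem_filter hp)
  have hMAnodup : MA.Nodup := hnd.sublist (List.Sublist.map Prod.fst List.filter_sublist)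
  -- (5) the state update fold
  set num := pvNumOf dist L rest rem with hnum
  have hupd :
      (MA.foldl (fun d a => d.modify a 0 (· + num)) toDel).items
        = dist.map (fun p =>
            (p.1, max ((p.2.length : Int) - L) 0
                  + (if L ≤ (p.2.length : Int) then num else 0))) := by
    have hk2 : (MA.foldl (fun d a => d.modify a 0 (· + num)) toDel).keys = dist.map Prod.fst := by
      rw [PySem.Dict.keys_foldl_modify MA 0 (fun _ _ => (· + num)) toDel, hkeysTD]
      exact pvSet_update_of_subset MA _ hMAsub
    have hk2nd : (MA.foldl (fun d a => d.modify a 0 (· + num)) toDel).keys.Nodup := by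
      rw [hk2]; exact hnd
    rw [PySem.Dict.items_eq_map_keys _ hk2nd 0, hk2, List.map_map]
    apply List.map_congr_left
    intro p hp
    simp only [Function.comp]
    congr 1
    rw [pvGetD_foldl_modify_add MA num toDel p.1 hMAnodup,
        pvGetD_items_map dist _ toDel hinv hnd p hp]
    congr 1
    have : p.1 ∈ MA ↔ (hf p == L) = true := pvMem_map_fst_filter dist _ hnd p hp
    by_cases hc : L ≤ (p.2.length : Int)
    · have : p.1 ∈ MA := this.mpr (by simp [hhf, min_eq_right hc])
      simp [this, hc]
    · have hne : ¬ (hf p == L) = true := by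
        simp only [hhf, beq_iff_eq]
        omega
      have : p.1 ∉ MA := fun hm => hne (this.mp hm)
      simp [this, hc]
  refine ⟨MA.foldl (fun d a => d.modify a 0 (· + num)) toDel, hupd, ?_⟩
  -- now unfold one iteration of A
  simp only [pvAIter]
  rw [if_neg (by omega : ¬ rem ≤ 0)]
  simp only [hfold, hkeys, hsorted, hmax]
  have hdiff :
      (if (L :: rest).length > 1 then L - PySem.List.pyGetD (L :: rest) 1 0 else L)
        = pvDiffOf L rest := by
    cases rest with
    | nil => simp [pvDiffOf]
    | cons L2 r2 =>
      have : PySem.List.pyGetD (L :: L2 :: r2) 1 0 = L2 := by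
        rw [PySem.List.pyGetD_ofNat']
        rfl
      simp [this, pvDiffOf]
  simp only [hdiff, hlenMA]
  have hnum2 : (if pvCeil rem ((pvKge dist L : Nat) : Int) > pvDiffOf L rest then pvDiffOf L rest
      else pvCeil rem ((pvKge dist L : Nat) : Int)) = num := by
    rw [hnum, pvNumOf]
  simp only [hnum2]
  rw [pvFoldPair MA (fun d a => d.modify a 0 (· + num)) toDel rem num]
  simp only [hlenMA]
-- cast form of pvKge_split
lemma pvK_cast (dist : List (String × List Int)) (L : Int) :
    (pvKgt dist L : Int) + ((pvHts dist).count L : Int) = (pvKge dist L : Int) := by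
  have := pvKge_split dist L
  push_cast [this]
  ring

lemma pvKge_pos (dist : List (String × List Int)) (L : Int)
    (hex : ∃ h ∈ pvHts dist, L ≤ h) : 0 < pvKge dist L := by
  rcases hex with ⟨h, hh, hLh⟩
  exact List.length_pos_of_mem (List.mem_filter.mpr ⟨hh, by simpa using hLh⟩)

-- the main loop correspondence: A's while-loop equals B's level walk
lemma pvMain (dist : List (String × List Int)) (hnd : (dist.map Prod.fst).Nodup) :
    ∀ (rest : List Int) (L : Int) (fuel : Nat) (toDel : PySem.Dict String Int) (rem : Int),
    ((L :: rest).Pairwise (· > ·)) →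
    (∀ v, v ∈ L :: rest ↔ (v = L ∨ (v ∈ pvHts dist ∧ v < L))) →
    (∃ h ∈ pvHts dist, L ≤ h) →
    toDel.items = dist.map (fun p => (p.1, max ((p.2.length : Int) - L) 0)) →
    0 < rem →
    rem ≤ ((pvHts dist).map (fun h => min h L)).sum →
    rest.length + 2 ≤ fuel →
    (pvAIter dist fuel toDel rem).items
      = pvBWalk dist (PySem.Dict.counter (pvHts dist)) (L :: rest) ((pvKgt dist L : Int)) rem := by
  intro rest
  induction rest with
  | nil =>
    intro L fuel toDel rem hpw hmem hex hinv hpos hbound hfuel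
    have hall : ∀ v ∈ pvHts dist, L ≤ v := by
      intro v hv
      by_contra hlt
      have hvm : v ∈ ([L] : List Int) := (hmem v).mpr (Or.inr ⟨hv, by omega⟩)
      simp at hvm; omega
    have hKpos := pvKge_pos dist L hex
    have hKposI : (0 : Int) < (pvKge dist L : Int) := by exact_mod_cast hKpos
    obtain ⟨f1, rfl⟩ : ∃ f1, fuel = f1 + 1 := ⟨fuel - 1, by omega⟩
    obtain ⟨td', hitems', hstep⟩ := pvIterStep dist hnd L [] toDel rem f1 hpw hmem hex hinv hpos
    have hKsum : ((pvHts dist).map (fun h => min h L)).sum = (pvKge dist L : Int) * L := by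
      have h1 : (pvHts dist).map (fun h => min h L) = (pvHts dist).map (fun _ => L) := by
        apply List.map_congr_left; intro v hv; have := hall v hv; omega
      have h2 : pvKge dist L = (pvHts dist).length := by
        unfold pvKge
        congr 1
        rw [List.filter_eq_self]
        intro v hv; simpa using hall v hv
      rw [h1, h2, List.map_const', List.sum_replicate]
      simp
    have hremK : rem ≤ (pvKge dist L : Int) * L := by rw [← hKsum]; exact hbound
    have hnumeq : pvNumOf dist L [] rem = pvCeil rem (pvKge dist L : Int) := by
      unfold pvNumOf pvDiffOf
      rw [if_neg]
      simp only [not_lt]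
      rw [pvCeil_le_iff _ _ _ hKposI]
      calc rem ≤ (pvKge dist L : Int) * L := hremK
        _ = L * (pvKge dist L : Int) := mul_comm _ _
    have hnum1 : 1 ≤ pvNumOf dist L [] rem := by
      rw [hnumeq]; exact pvCeil_pos rem _ hKposI hpos
    have hrem' : rem - pvNumOf dist L [] rem * (pvKge dist L : Int) ≤ 0 := by
      rw [hnumeq]
      have := pvCeil_mul_ge rem (pvKge dist L : Int) hKposI
      omega
    rw [hstep]
    obtain ⟨f2, rfl⟩ : ∃ f2, f1 = f2 + 1 := ⟨f1 - 1, by omega⟩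
    have hret : pvAIter dist (f2 + 1) td'
        (rem - pvNumOf dist L [] rem * (pvKge dist L : Int)) = td' := by
      simp only [pvAIter]
      rw [if_pos hrem']
    rw [hret]
    -- B side
    simp only [pvBWalk, PySem.Dict.getD_counter, pvK_cast dist L]
    rw [if_pos (show rem ≤ (pvKge dist L : Int) * (L - 0) by rw [sub_zero]; exact hremK)]
    rw [hitems']
    apply List.map_congr_left
    intro p hp
    have hpL : L ≤ (p.2.length : Int) :=
      hall _ (List.mem_map_of_mem (f := fun p : String × List Int => ((p.2.length : Int))) hp)
    have hper : -(PySem.Int.floordiv (-rem) (pvKge dist L : Int)) = pvNumOf dist L [] rem := by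
      rw [hnumeq]; rfl
    rw [hper]
    have := hnum1
    congr 1
    omega
  | cons L2 rest2 ih =>
    intro L fuel toDel rem hpw hmem hex hinv hpos hbound hfuel
    have hpc := List.pairwise_cons.mp hpw
    have hL2L : L2 < L := hpc.1 L2 List.mem_cons_self
    have hpw2 : (L2 :: rest2).Pairwise (· > ·) := hpc.2
    have hpc2 := List.pairwise_cons.mp hpw2
    have hub : ∀ v ∈ pvHts dist, v < L → v ≤ L2 := by
      intro v hv hvL
      have hvm : v ∈ L :: L2 :: rest2 := (hmem v).mpr (Or.inr ⟨hv, hvL⟩)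
      rcases List.mem_cons.mp hvm with rfl | hvm2
      · omega
      · rcases List.mem_cons.mp hvm2 with rfl | hvm3
        · exact le_rfl
        · exact le_of_lt (hpc2.1 v hvm3)
    have hKpos := pvKge_pos dist L hex
    have hKposI : (0 : Int) < (pvKge dist L : Int) := by exact_mod_cast hKpos
    obtain ⟨f1, rfl⟩ : ∃ f1, fuel = f1 + 1 := ⟨fuel - 1, by omega⟩
    obtain ⟨td', hitems', hstep⟩ :=
      pvIterStep dist hnd L (L2 :: rest2) toDel rem f1 hpw hmem hex hinv hpos
    have hdiffv : pvDiffOf L (L2 :: rest2) = L - L2 := rfl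
    rw [hstep]
    by_cases hc : rem ≤ (pvKge dist L : Int) * (L - L2)
    · -- last iteration: A finishes, B returns here
      have hnumeq : pvNumOf dist L (L2 :: rest2) rem = pvCeil rem (pvKge dist L : Int) := by
        unfold pvNumOf
        rw [hdiffv, if_neg]
        simp only [not_lt]
        rw [pvCeil_le_iff _ _ _ hKposI]
        calc rem ≤ (pvKge dist L : Int) * (L - L2) := hc
          _ = (L - L2) * (pvKge dist L : Int) := mul_comm _ _
      have hnum1 : 1 ≤ pvNumOf dist L (L2 :: rest2) rem := by
        rw [hnumeq]; exact pvCeil_pos rem _ hKposI hpos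
      have hnumdiff : pvNumOf dist L (L2 :: rest2) rem ≤ L - L2 := by
        rw [hnumeq, pvCeil_le_iff _ _ _ hKposI]
        calc rem ≤ (pvKge dist L : Int) * (L - L2) := hc
          _ = (L - L2) * (pvKge dist L : Int) := mul_comm _ _
      have hrem' : rem - pvNumOf dist L (L2 :: rest2) rem * (pvKge dist L : Int) ≤ 0 := by
        rw [hnumeq]
        have := pvCeil_mul_ge rem (pvKge dist L : Int) hKposI
        omega
      obtain ⟨f2, rfl⟩ : ∃ f2, f1 = f2 + 1 := ⟨f1 - 1, by omega⟩
      have hret : pvAIter dist (f2 + 1) td'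
          (rem - pvNumOf dist L (L2 :: rest2) rem * (pvKge dist L : Int)) = td' := by
        simp only [pvAIter]
        rw [if_pos hrem']
      rw [hret]
      simp only [pvBWalk, PySem.Dict.getD_counter, pvK_cast dist L]
      rw [if_pos hc, hitems']
      apply List.map_congr_left
      intro p hp
      have hper : -(PySem.Int.floordiv (-rem) (pvKge dist L : Int))
          = pvNumOf dist L (L2 :: rest2) rem := by
        rw [hnumeq]; rfl
      rw [hper]
      by_cases hpL : L ≤ (p.2.length : Int)
      · have := hnum1
        simp only [hpL, if_pos]
        congr 1
        omega
      · have hple : (p.2.length : Int) ≤ L2 := by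
          by_cases hmem2 : (p.2.length : Int) ∈ pvHts dist
          · exact hub _ hmem2 (by omega)
          · exact absurd (List.mem_map_of_mem (f := fun p : String × List Int => ((p.2.length : Int))) hp) hmem2
        simp only [hpL, if_neg, not_false_iff]
        congr 1
        omega
    · -- capped iteration: both sides move to level L2
      have hnumeq : pvNumOf dist L (L2 :: rest2) rem = L - L2 := by
        unfold pvNumOf
        rw [hdiffv, if_pos]
        by_contra hcon
        simp only [not_lt] at hcon
        rw [pvCeil_le_iff _ _ _ hKposI] at hcon
        apply hc
        calc rem ≤ (L - L2) * (pvKge dist L : Int) := hcon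
          _ = (pvKge dist L : Int) * (L - L2) := mul_comm _ _
      have hsum := pvSum_min_drop (pvHts dist) L L2 (le_of_lt hL2L) hub
      have hKfilter : ((((pvHts dist).filter (fun v => decide (L ≤ v))).length : Nat) : Int)
          = (pvKge dist L : Int) := rfl
      rw [hsum, hKfilter] at hbound
      -- use the induction hypothesis at level L2
      have hmem2 : ∀ v, v ∈ L2 :: rest2 ↔ (v = L2 ∨ (v ∈ pvHts dist ∧ v < L2)) := by
        intro v
        constructor
        · intro hv
          rcases List.mem_cons.mp hv with rfl | hv2
          · exact Or.inl rfl
          · have hvtail : v ∈ L :: L2 :: rest2 := List.mem_cons_of_mem _ hv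
            have hvL : v < L2 := hpc2.1 v hv2
            rcases (hmem v).mp hvtail with rfl | ⟨h1, _⟩
            · omega
            · exact Or.inr ⟨h1, hvL⟩
        · intro hv
          rcases hv with rfl | ⟨h1, h2⟩
          · exact List.mem_cons_self
          · have : v ∈ L :: L2 :: rest2 := (hmem v).mpr (Or.inr ⟨h1, by omega⟩)
            rcases List.mem_cons.mp this with rfl | hv2
            · omega
            · exact hv2
      have hex2 : ∃ h ∈ pvHts dist, L2 ≤ h := by
        rcases hex with ⟨h, hh, hLh⟩
        exact ⟨h, hh, by omega⟩
      have hinv2 : td'.items = dist.map (fun p => (p.1, max ((p.2.length : Int) - L2) 0)) := by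
        rw [hitems']
        apply List.map_congr_left
        intro p hp
        rw [hnumeq]
        by_cases hpL : L ≤ (p.2.length : Int)
        · simp only [hpL, if_pos]
          congr 1
          omega
        · have hple : (p.2.length : Int) ≤ L2 :=
            hub _ (List.mem_map_of_mem (f := fun p : String × List Int => ((p.2.length : Int))) hp) (by omega)
          simp only [hpL, if_neg, not_false_iff]
          congr 1
          omega
      have hpos2 : 0 < rem - pvNumOf dist L (L2 :: rest2) rem * (pvKge dist L : Int) := by
        rw [hnumeq]
        have : (pvKge dist L : Int) * (L - L2) < rem := by omega
        have hmc : (L - L2) * (pvKge dist L : Int) = (pvKge dist L : Int) * (L - L2) := mul_comm _ _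
        omega
      have hbound2 : rem - pvNumOf dist L (L2 :: rest2) rem * (pvKge dist L : Int)
          ≤ ((pvHts dist).map (fun h => min h L2)).sum := by
        rw [hnumeq]
        have hmc : (L - L2) * (pvKge dist L : Int) = (pvKge dist L : Int) * (L - L2) := mul_comm _ _
        omega
      have hfuel2 : rest2.length + 2 ≤ f1 := by
        simp only [List.length_cons] at hfuel
        omega
      have hkgt2 : (pvKgt dist L2 : Int) = (pvKge dist L : Int) := by
        have : (pvHts dist).filter (fun v => decide (L2 < v))
            = (pvHts dist).filter (fun v => decide (L ≤ v)) := by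
          apply List.filter_congr
          intro v hv
          by_cases hvL : L ≤ v
          · simp [hvL]; omega
          · have : v ≤ L2 := hub v hv (by omega)
            simp [hvL]; omega
        unfold pvKgt pvKge
        rw [this]
      have hIH := ih L2 f1 td' (rem - pvNumOf dist L (L2 :: rest2) rem * (pvKge dist L : Int))
        hpw2 hmem2 hex2 hinv2 hpos2 hbound2 hfuel2
      rw [hIH, hkgt2]
      -- B side: one step of the walk
      conv_rhs => rw [pvBWalk]
      simp only [PySem.Dict.getD_counter, pvK_cast dist L]
      rw [if_neg hc]
      congr 1
      rw [hnumeq]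
      ring

-- ===== VERDICT (by name: the statement is the Claim_ definition above) =====
-- the initial to_del: every key of dist mapped to 0, in dist order
lemma pvInit (dist : List (String × List Int)) (hnd : (dist.map Prod.fst).Nodup) :
    (dist.foldl (fun d p => d.insert p.1 0) PySem.Dict.empty).items
      = dist.map (fun p => (p.1, (0 : Int))) := by
  have h := PySem.Dict.items_foldl_insert_fresh dist Prod.fst (fun _ => (0 : Int))
    PySem.Dict.empty (fun a _ => PySem.Dict.contains_empty _) hnd
  simpa using h

theorem deleteXFromDistr_spec : Claim_equal_deleteXFromDistr := by
  unfold Claim_equal_deleteXFromDistr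
  intro dist x _ hpre
  unfold Spec_deleteXFromDistr
  obtain ⟨hnd, hsum⟩ := hpre
  unfold deleteXFromDistr deleteXFromDistr_alt
  simp only []
  by_cases hx : x ≤ 0
  · have h1 : pvAIter dist (dist.length + 1)
        (dist.foldl (fun d p => d.insert p.1 0) PySem.Dict.empty) x
        = dist.foldl (fun d p => d.insert p.1 0) PySem.Dict.empty := by
      simp only [pvAIter]
      rw [if_pos hx]
    rw [h1, pvInit dist hnd, if_pos hx]
  · rw [if_neg hx]
    push_cast at hx
    have hxpos : 0 < x := by omega
    -- B's count dict is the counter of the heights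
    rw [PySem.Dict.foldl_insert_getD_add_one_eq_counter, PySem.Dict.keys_counter]
    have hhts : dist.map (fun p => ((p.2.length : Int))) = pvHts dist := rfl
    rw [hhts]
    have hne : dist ≠ [] := by
      intro h; subst h; simp at hsum; omega
    have hlvne : PySem.List.sorted (PySem.Set.ofList (pvHts dist)) (fun v => v) true ≠ [] := by
      rw [Ne, PySem.List.sorted_eq_nil_iff]
      intro h
      cases dist with
      | nil => exact hne rfl
      | cons p t =>
        have hm : ((p.2.length : Int)) ∈ PySem.Set.ofList (pvHts (p :: t)) := by
          rw [PySem.Set.mem_ofList]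
          exact List.mem_map_of_mem List.mem_cons_self
        rw [h] at hm
        simp at hm
    cases hlv : PySem.List.sorted (PySem.Set.ofList (pvHts dist)) (fun v => v) true with
    | nil => exact absurd hlv hlvne
    | cons L0 rest0 =>
      have hmemlv : ∀ v, v ∈ L0 :: rest0 ↔ v ∈ pvHts dist := by
        intro v
        rw [← hlv, PySem.List.mem_sorted, PySem.Set.mem_ofList]
      have hle0 : ∀ v ∈ pvHts dist, v ≤ L0 := by
        intro v hv
        have := PySem.List.key_head_sorted_rev_ge _ _ hlv v (by rwa [PySem.Set.mem_ofList])
        simpa using this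
      have hnodup : (L0 :: rest0).Nodup := by
        rw [← hlv]
        exact ((PySem.List.sorted_perm _ _ _).nodup_iff).mpr (PySem.Set.nodup_ofList _)
      have hpw0 : (L0 :: rest0).Pairwise (· > ·) := by
        have h1 : (L0 :: rest0).Pairwise (fun a b => b ≤ a) := by
          rw [← hlv]
          exact PySem.List.sorted_pairwise_rev _ _
        have h2 := h1.and hnodup
        exact h2.imp (fun h => by omega)
      have hmem0 : ∀ v, v ∈ L0 :: rest0 ↔ (v = L0 ∨ (v ∈ pvHts dist ∧ v < L0)) := by
        intro v
        rw [hmemlv]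
        constructor
        · intro hv
          have := hle0 v hv
          rcases eq_or_lt_of_le this with h | h
          · exact Or.inl h
          · exact Or.inr ⟨hv, h⟩
        · rintro (h | ⟨h1, _⟩)
          · rw [h]; exact (hmemlv L0).mp List.mem_cons_self
          · exact h1
      have hex0 : ∃ h ∈ pvHts dist, L0 ≤ h :=
        ⟨L0, (hmemlv L0).mp List.mem_cons_self, le_rfl⟩
      have hinv0 : (dist.foldl (fun d p => d.insert p.1 0) PySem.Dict.empty).items
          = dist.map (fun p => (p.1, max ((p.2.length : Int) - L0) 0)) := by
        rw [pvInit dist hnd]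
        apply List.map_congr_left
        intro p hp
        have : (p.2.length : Int) ≤ L0 :=
          hle0 _ (List.mem_map_of_mem (f := fun p : String × List Int => ((p.2.length : Int))) hp)
        congr 1
        omega
      have hbound0 : x ≤ ((pvHts dist).map (fun h => min h L0)).sum := by
        have : (pvHts dist).map (fun h => min h L0) = (pvHts dist).map (fun h => h) := by
          apply List.map_congr_left
          intro v hv
          have := hle0 v hv
          omega
        rw [this, List.map_id']
        exact hsum
      have hfuel0 : rest0.length + 2 ≤ dist.length + 1 := by
        have h1 : (L0 :: rest0).length = (PySem.Set.ofList (pvHts dist)).length := by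
          rw [← hlv]
          exact (PySem.List.sorted_perm _ _ _).length_eq
        have h2 : (PySem.Set.ofList (pvHts dist)).length ≤ (pvHts dist).length :=
          ((PySem.Set.nodup_ofList _).subperm
            (fun v hv => (PySem.Set.mem_ofList _ v).mp hv)).length_le
        have h3 : (pvHts dist).length = dist.length := by unfold pvHts; simp
        simp only [List.length_cons] at h1
        omega
      have hkgt0 : ((pvKgt dist L0 : Nat) : Int) = 0 := by
        unfold pvKgt
        rw [List.filter_eq_nil_iff.mpr]
        · rfl
        · intro v hv
          have := hle0 v hv
          simpa using by omega
      rw [pvMain dist hnd rest0 L0 (dist.length + 1) _ x hpw0 hmem0 hex0 hinv0 hxpos hbound0 hfuel0,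
        hkgt0]
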